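-- pv_equiv track=rewrite | github.com/weisrc/strong-align | strong_align/preprocess.py | normalize_abbr
-- ===== SOURCE A (Python) =====
-- from typing import Tuple, List
--
-- ABBR = {
--     "en": {'dr.': "doctor", 'mr.': "mister", 'mrs.': "missus", 'prof.': "professor"},
--     "es": {'dr.': "doctor", 'sr.': "señor", 'sra.': "señora", 'prof.': "profesor"},
--     "fr": {'dr.': "docteur", 'm.': "monsieur", 'mme.': "madame", 'prof.': "professeur"},
--     "de": {'dr.': "doktor", 'prof.': "professor"},
--     "it": {'dr.': "dottore", 'prof.': "professore"},
--     "pt": {'dr.': "doutor", 'prof.': "professor"},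
-- }
--
-- def normalize_abbr(text: str, mappings: List[int], language_code: str) -> Tuple[str, List[int]]:
--     if language_code not in ABBR:
--         return text, mappings
--     for abbr, value in ABBR[language_code].items():
--         while True:
--             start = text.find(abbr)
--             if start == -1:
--                 break
--             end = start + len(abbr)
--             text, mappings = augment(text, mappings, start, end, value)
--     return text, mappings
--
-- def augment(text: str, mappings: List[int], start: int, end: int, value: str):
--     mapped_start = mappings[start]
--     mapped_end = mappings[end-1]
--     insertion = []
--     for i in range(mapped_start, mapped_start + len(value)):
--         insertion.append(min(i, mapped_end))
--     return (text[:start] + value + text[end:],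
--             mappings[:start] + insertion + mappings[end:])
-- ===== SOURCE B (Python) =====
-- ABBR = {
--     "en": {'dr.': "doctor", 'mr.': "mister", 'mrs.': "missus", 'prof.': "professor"},
--     "es": {'dr.': "doctor", 'sr.': "señor", 'sra.': "señora", 'prof.': "profesor"},
--     "fr": {'dr.': "docteur", 'm.': "monsieur", 'mme.': "madame", 'prof.': "professeur"},
--     "de": {'dr.': "doktor", 'prof.': "professor"},
--     "it": {'dr.': "dottore", 'prof.': "professore"},
--     "pt": {'dr.': "doutor", 'prof.': "professor"},
-- }
--
-- def normalize_abbr(text, mappings, language_code):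
--     if language_code not in ABBR:
--         return text, mappings
--     for abbr, value in ABBR[language_code].items():
--         n = len(abbr)
--         parts, out_m = [], []
--         pos = 0
--         while True:
--             i = text.find(abbr, pos)
--             if i == -1:
--                 parts.append(text[pos:])
--                 out_m.extend(mappings[pos:])
--                 break
--             mapped_start = mappings[i]
--             mapped_end = mappings[i + n - 1]
--             parts.append(text[pos:i])
--             parts.append(value)
--             out_m.extend(mappings[pos:i])
--             out_m.extend(min(j, mapped_end) for j in range(mapped_start, mapped_start + len(value)))
--             pos = i + n
--         text = "".join(parts)
--         mappings = out_m
--     return text, mappings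
-- ===== Notes on version B (the rewrite author's own statement) =====
-- stated objective: alternative
-- what changed: Instead of rescanning the whole text from position 0 and rebuilding text and mappings after every single replacement, B makes one left-to-right pass per abbreviation, resuming the search after each match and assembling the new text and mapping list once from collected pieces.
-- outside the precondition, e.g. on normalize_abbr('xdr.', [0, 1, 2], 'en'): A raises IndexError, B raises IndexError
import Mathlib
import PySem

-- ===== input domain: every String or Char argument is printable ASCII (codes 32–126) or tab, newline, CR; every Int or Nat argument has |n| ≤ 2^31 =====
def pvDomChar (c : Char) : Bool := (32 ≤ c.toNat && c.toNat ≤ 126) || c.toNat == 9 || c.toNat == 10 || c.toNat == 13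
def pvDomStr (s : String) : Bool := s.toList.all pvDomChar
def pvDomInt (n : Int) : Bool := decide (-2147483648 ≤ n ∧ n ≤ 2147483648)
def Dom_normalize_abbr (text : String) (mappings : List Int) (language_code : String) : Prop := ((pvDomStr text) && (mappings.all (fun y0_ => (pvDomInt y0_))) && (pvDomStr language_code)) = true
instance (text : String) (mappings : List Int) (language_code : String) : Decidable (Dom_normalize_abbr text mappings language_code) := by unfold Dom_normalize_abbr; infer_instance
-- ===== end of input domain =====

-- B replaces A's per-match rescan-from-zero and full text/mappings rebuild by one left-to-right
-- pass per abbreviation that assembles the new text and mappings once (objective: alternative).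

-- ===== PORT A =====
-- the module-level ABBR dict (insertion order), shared context of both implementations
def pvABBR : List (String × List (String × String)) :=
  [("en", [("dr.", "doctor"), ("mr.", "mister"), ("mrs.", "missus"), ("prof.", "professor")]),
   ("es", [("dr.", "doctor"), ("sr.", "señor"), ("sra.", "señora"), ("prof.", "profesor")]),
   ("fr", [("dr.", "docteur"), ("m.", "monsieur"), ("mme.", "madame"), ("prof.", "professeur")]),
   ("de", [("dr.", "doktor"), ("prof.", "professor")]),
   ("it", [("dr.", "dottore"), ("prof.", "professore")]),
   ("pt", [("dr.", "doutor"), ("prof.", "professor")])]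

-- augment(text, mappings, start, end, value), on char lists
def pvAugmentA (t : List Char) (m : List Int) (start e : Int) (v : List Char) : List Char × List Int :=
  let mapped_start := PySem.List.pyGetD m start 0
  let mapped_end := PySem.List.pyGetD m (e - 1) 0
  let insertion := (PySem.List.pyRange mapped_start (mapped_start + PySem.List.len v) 1).foldl
      (fun acc i => acc ++ [min i mapped_end]) []
  (PySem.List.slice t none (some start) ++ v ++ PySem.List.slice t (some e) none,
   PySem.List.slice m none (some start) ++ insertion ++ PySem.List.slice m (some e) none)

-- the 'while True' loop of A for one abbreviation (fuel is a totality guard; the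
-- equivalence proof shows fuel text.length + 1 is never exhausted)
def pvLoopA (a v : List Char) : Nat → List Char × List Int → List Char × List Int
  | 0, st => st
  | fuel + 1, st =>
    let start := PySem.Chars.find st.1 a
    if start = -1 then st
    else pvLoopA a v fuel (pvAugmentA st.1 st.2 start (start + PySem.List.len a) v)

def normalize_abbr (text : String) (mappings : List Int) (language_code : String) : String × List Int :=
  match pvABBR.lookup language_code with
  | none => (text, mappings)
  | some items =>
    let st := items.foldl
      (fun (st : List Char × List Int) (p : String × String) =>
        pvLoopA p.1.toList p.2.toList (st.1.length + 1) st)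
      (text.toList, mappings)
    (String.ofList st.1, st.2)

-- ===== PORT B =====
-- one left-to-right scan for one abbreviation, accumulating pieces of the new text/mappings
def pvScanB (a v t : List Char) (m : List Int) : Nat → Int → List Char → List Int → List Char × List Int
  | 0, _, accT, accM => (accT, accM)
  | fuel + 1, pos, accT, accM =>
    let i := PySem.Chars.findFrom t a pos
    if i = -1 then
      (accT ++ PySem.List.slice t (some pos) none, accM ++ PySem.List.slice m (some pos) none)
    else
      let mapped_start := PySem.List.pyGetD m i 0
      let mapped_end := PySem.List.pyGetD m (i + PySem.List.len a - 1) 0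
      pvScanB a v t m fuel (i + PySem.List.len a)
        (accT ++ PySem.List.slice t (some pos) (some i) ++ v)
        (accM ++ PySem.List.slice m (some pos) (some i) ++
          (PySem.List.pyRange mapped_start (mapped_start + PySem.List.len v) 1).map
            (fun j => min j mapped_end))

def normalize_abbr_alt (text : String) (mappings : List Int) (language_code : String) : String × List Int :=
  match pvABBR.lookup language_code with
  | none => (text, mappings)
  | some items =>
    let st := items.foldl
      (fun (st : List Char × List Int) (p : String × String) =>
        pvScanB p.1.toList p.2.toList st.1 st.2 (st.1.length + 1) 0 [] [])
      (text.toList, mappings)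
    (String.ofList st.1, st.2)

-- ===== PRECONDITION & SPEC =====
-- Pre_ excludes inputs whose mappings list is shorter than the text while the text contains an
-- abbreviation of the chosen language: there A (and B alike) generally raises IndexError when a
-- replacement site indexes past the mappings list.
def pvPreTable : List (String × List String) :=
  [("en", ["dr.", "mr.", "mrs.", "prof."]), ("es", ["dr.", "sr.", "sra.", "prof."]),
   ("fr", ["dr.", "m.", "mme.", "prof."]), ("de", ["dr.", "prof."]),
   ("it", ["dr.", "prof."]), ("pt", ["dr.", "prof."])]

def Pre_normalize_abbr (text : String) (mappings : List Int) (language_code : String) : Prop :=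
  text.toList.length ≤ mappings.length ∨
  (∀ lp ∈ pvPreTable, lp.1 = language_code → ∀ ab ∈ lp.2, PySem.Str.isIn ab text = false)

instance (text : String) (mappings : List Int) (language_code : String) : Decidable (Pre_normalize_abbr text mappings language_code) := by unfold Pre_normalize_abbr; infer_instance

def pvWitness_normalize_abbr : String × List Int × String :=
  ("mr. smith", [0, 1, 2, 3, 4, 5, 6, 7, 8], "en")

def Spec_normalize_abbr (text : String) (mappings : List Int) (language_code : String) (out : String × List Int) : Prop := out = normalize_abbr_alt text mappings language_code
instance (text : String) (mappings : List Int) (language_code : String) (out : String × List Int) : Decidable (Spec_normalize_abbr text mappings language_code out) := by unfold Spec_normalize_abbr; infer_instance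

-- ===== CLAIM (what is proved, stated in full; the proofs are below) =====
def Claim_equal_normalize_abbr : Prop := ∀ (text : String) (mappings : List Int) (language_code : String), Dom_normalize_abbr text mappings language_code → Pre_normalize_abbr text mappings language_code → Spec_normalize_abbr text mappings language_code (normalize_abbr text mappings language_code)

-- ===== LEMMAS AND PROOFS =====

-- the (abbr, value) pairs of the table satisfy: nonempty abbr ending in '.', no '.' in the
-- value, value longer than abbr, and no nonempty proper prefix of abbr is a suffix of value
abbrev pvGood (a v : List Char) : Prop :=
  0 < a.length ∧ a.getLast? = some '.' ∧ '.' ∉ v ∧ a.length < v.length ∧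
  ∀ k, k < a.length → 0 < k → a.take k ≠ v.drop (v.length - k)


-- reference one-pass function both loops are proved equal to
def pvIns (ms me : Int) (vlen : Nat) : List Int :=
  (PySem.List.pyRange ms (ms + (vlen : Int)) 1).map (fun j => min j me)

def pvProc (a v : List Char) (t : List Char) (m : List Int) : List Char × List Int :=
  if h : 0 ≤ PySem.Chars.find t a ∧ 0 < a.length ∧
      (PySem.Chars.find t a).toNat + a.length ≤ t.length then
    (t.take (PySem.Chars.find t a).toNat ++ v ++
       (pvProc a v (t.drop ((PySem.Chars.find t a).toNat + a.length))
         (m.drop ((PySem.Chars.find t a).toNat + a.length))).1,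
     m.take (PySem.Chars.find t a).toNat ++
       pvIns (m.getD (PySem.Chars.find t a).toNat 0)
         (m.getD ((PySem.Chars.find t a).toNat + a.length - 1) 0) v.length ++
       (pvProc a v (t.drop ((PySem.Chars.find t a).toNat + a.length))
         (m.drop ((PySem.Chars.find t a).toNat + a.length))).2)
  else (t, m)
termination_by t.length
decreasing_by simp only [List.length_drop]; omega

-- number of (greedy, non-overlapping) occurrences A still has to replace
def pvOcc (a : List Char) (t : List Char) : Nat :=
  if h : 0 ≤ PySem.Chars.find t a ∧ 0 < a.length ∧
      (PySem.Chars.find t a).toNat + a.length ≤ t.length then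
    pvOcc a (t.drop ((PySem.Chars.find t a).toNat + a.length)) + 1
  else 0
termination_by t.length
decreasing_by simp only [List.length_drop]; omega

lemma pvFind_no_occ {a t : List Char} (h : PySem.Chars.find t a = -1) (j : Nat) :
    ¬ a <+: t.drop j := by
  intro hp
  have hin : PySem.Chars.isIn a t = true :=
    (PySem.Chars.exists_prefix_drop_iff_isIn a t).1 ⟨j, hp⟩
  have := (PySem.Chars.find_eq_neg_one_iff t a).1 h
  exact this ((PySem.Chars.isIn_iff_infix a t).1 hin)

lemma pvFind_eq {a t : List Char} (n : Nat) (h1 : a <+: t.drop n)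
    (h2 : ∀ j < n, ¬ a <+: t.drop j) : PySem.Chars.find t a = (n : Int) := by
  have hne : PySem.Chars.find t a ≠ -1 := by
    intro h
    exact pvFind_no_occ h n h1
  have hge : 0 ≤ PySem.Chars.find t a := by
    have := PySem.Chars.neg_one_le_find t a
    omega
  obtain ⟨hpre, hmin⟩ := PySem.Chars.find_spec hge
  rcases Nat.lt_trichotomy (PySem.Chars.find t a).toNat n with h | h | h
  · exact absurd hpre (h2 _ h)
  · omega
  · exact absurd h1 (hmin n h)

lemma pvFind_bounds {a t : List Char} {sn : Nat}
    (h : PySem.Chars.find t a = (sn : Int)) : sn + a.length ≤ t.length := by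
  have hge : 0 ≤ PySem.Chars.find t a := by rw [h]; exact Int.natCast_nonneg sn
  obtain ⟨hpre, -⟩ := PySem.Chars.find_spec hge
  rw [h] at hpre
  simp only [Int.toNat_natCast] at hpre
  have h1 := hpre.length_le
  have h2 := PySem.Chars.find_le_length t a
  rw [h] at h2
  simp only [List.length_drop] at h1
  omega

def pvShield (a v P : List Char) : Prop :=
  (∀ j, j + a.length ≤ P.length → ¬ a <+: P.drop j) ∧ (∃ Q, P = Q ++ v)

lemma pvShield_noocc {a v P : List Char} (hg : pvGood a v) (hs : pvShield a v P)
    (S : List Char) {j : Nat} (hj : j < P.length) : ¬ a <+: (P ++ S).drop j := by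
  intro hp
  have hdrop : (P ++ S).drop j = P.drop j ++ S := by
    rw [List.drop_append, show j - P.length = 0 by omega]
    simp
  by_cases hc : j + a.length ≤ P.length
  · apply hs.1 j hc
    rw [hdrop] at hp
    rw [List.prefix_iff_eq_take] at hp ⊢
    rw [List.take_append, show a.length - (P.drop j).length = 0 by
      simp only [List.length_drop]; omega] at hp
    simpa using hp
  · push_neg at hc
    have hk1 : 0 < P.length - j := by omega
    have hk2 : P.length - j < a.length := by omega
    have hPd : (P.drop j).length = P.length - j := by simp
    have htk : a.take (P.length - j) = P.drop j := by
      rw [List.prefix_iff_eq_take] at hp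
      have h1 : a.take (P.length - j) = ((P ++ S).drop j).take (P.length - j) := by
        rw [hp, List.take_take]
        congr 1
        omega
      rw [hdrop, List.take_append, show P.length - j - (P.drop j).length = 0 by omega,
        List.take_zero, List.append_nil, List.take_of_length_le (le_of_eq hPd)] at h1
      exact h1
    obtain ⟨Q, hQ⟩ := hs.2
    have hPl : P.length = Q.length + v.length := by rw [hQ]; simp
    have hjQ : Q.length ≤ j := by
      have := hg.2.2.2.1
      omega
    have hvv : P.drop j = v.drop (v.length - (P.length - j)) := by
      conv_lhs => rw [hQ]
      rw [List.drop_append, List.drop_eq_nil_of_le hjQ, List.nil_append]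
      congr 1
      omega
    exact hg.2.2.2.2 (P.length - j) hk2 hk1 (htk.trans hvv)

lemma pvDrop_append_ge {α : Type} (P S : List α) (j : Nat) (h : P.length ≤ j) :
    (P ++ S).drop j = S.drop (j - P.length) := by
  rw [List.drop_append, List.drop_eq_nil_of_le h]
  simp

lemma pvFS {a v P : List Char} (hg : pvGood a v) (hs : pvShield a v P) (S : List Char) :
    PySem.Chars.find (P ++ S) a =
      if PySem.Chars.find S a = -1 then -1 else (P.length : Int) + PySem.Chars.find S a := by
  by_cases hS : PySem.Chars.find S a = -1
  · rw [if_pos hS, PySem.Chars.find_eq_neg_one_iff]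
    intro hinf
    obtain ⟨j, hj⟩ := (PySem.Chars.exists_prefix_drop_iff_isIn a (P ++ S)).2
      ((PySem.Chars.isIn_iff_infix a (P ++ S)).2 hinf)
    by_cases hjP : j < P.length
    · exact pvShield_noocc hg hs S hjP hj
    · rw [pvDrop_append_ge P S j (by omega)] at hj
      exact pvFind_no_occ hS _ hj
  · have hge : 0 ≤ PySem.Chars.find S a := by
      have := PySem.Chars.neg_one_le_find S a
      omega
    have hSf : PySem.Chars.find S a = ((PySem.Chars.find S a).toNat : Int) := by omega
    obtain ⟨hpre, hmin⟩ := PySem.Chars.find_spec hge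
    rw [if_neg hS, hSf]
    have heq : PySem.Chars.find (P ++ S) a = ((P.length + (PySem.Chars.find S a).toNat : Nat) : Int) := by
      apply pvFind_eq
      · rw [pvDrop_append_ge P S _ (by omega), show P.length + (PySem.Chars.find S a).toNat - P.length = (PySem.Chars.find S a).toNat by omega]
        exact hpre
      · intro j hj hp
        by_cases hjP : j < P.length
        · exact pvShield_noocc hg hs S hjP hp
        · rw [pvDrop_append_ge P S j (by omega)] at hp
          exact hmin (j - P.length) (by omega) hp
    rw [heq]
    push_cast
    ring

lemma pvShield_of_find {a v t : List Char} {sn : Nat} (hg : pvGood a v)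
    (h : PySem.Chars.find t a = (sn : Int)) : pvShield a v (t.take sn ++ v) := by
  refine ⟨?_, ⟨t.take sn, rfl⟩⟩
  intro j hjlen hp
  have hsn : sn + a.length ≤ t.length := pvFind_bounds h
  have ha0 : 0 < a.length := hg.1
  have htl : (t.take sn).length = sn := by simp; omega
  have hPlen : (t.take sn ++ v).length = sn + v.length := by simp [htl]
  by_cases hcase : j + a.length ≤ sn
  · have hocc : a <+: t.drop j := by
      rw [List.prefix_iff_eq_take] at hp ⊢
      rw [List.drop_append, show j - (t.take sn).length = 0 by omega] at hp
      simp only [List.drop_zero] at hp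
      rw [List.take_append, show a.length - ((t.take sn).drop j).length = 0 by
        simp only [List.length_drop, htl]; omega] at hp
      simp only [List.take_zero, List.append_nil] at hp
      rw [List.drop_take, List.take_take, show min a.length (sn - j) = a.length by omega] at hp
      exact hp
    have hge : 0 ≤ PySem.Chars.find t a := by rw [h]; exact Int.natCast_nonneg sn
    have hmin := (PySem.Chars.find_spec hge).2
    rw [h] at hmin
    simp only [Int.toNat_natCast] at hmin
    exact hmin j (by omega) hocc
  · push_neg at hcase
    obtain ⟨r, hr⟩ := hp
    have hdot : a[a.length - 1]? = some '.' := by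
      have := hg.2.2.1
      have hl := hg.2.1
      rwa [List.getLast?_eq_getElem?] at hl
    have hPidx : (t.take sn ++ v)[j + (a.length - 1)]? = some '.' := by
      have h1 : ((t.take sn ++ v).drop j)[a.length - 1]? = some '.' := by
        rw [← hr, List.getElem?_append_left (by omega)]
        exact hdot
      rwa [List.getElem?_drop] at h1
    rw [List.getElem?_append_right (by omega)] at hPidx
    have : '.' ∈ v := by
      have hlt : j + (a.length - 1) - (t.take sn).length < v.length := by
        have := hjlen
        simp only [hPlen] at this
        simp only [htl]
        omega
      exact List.mem_of_getElem? hPidx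
    exact hg.2.2.1 this

lemma pvProc_neg {a v t m} (h : PySem.Chars.find t a = -1) : pvProc a v t m = (t, m) := by
  rw [pvProc, dif_neg]
  intro hc
  rw [h] at hc
  exact absurd hc.1 (by norm_num)

lemma pvProc_pos {a v t : List Char} {m : List Int} {sn : Nat} (hg : pvGood a v)
    (h : PySem.Chars.find t a = (sn : Int)) :
    pvProc a v t m =
      (t.take sn ++ v ++ (pvProc a v (t.drop (sn + a.length)) (m.drop (sn + a.length))).1,
       m.take sn ++ pvIns (m.getD sn 0) (m.getD (sn + a.length - 1) 0) v.length ++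
         (pvProc a v (t.drop (sn + a.length)) (m.drop (sn + a.length))).2) := by
  have hb := pvFind_bounds h
  rw [pvProc, dif_pos (by rw [h]; exact ⟨Int.natCast_nonneg sn, hg.1, by simp [pvFind_bounds h]⟩)]
  simp only [h, Int.toNat_natCast]

lemma pvOcc_neg {a t} (h : PySem.Chars.find t a = -1) : pvOcc a t = 0 := by
  rw [pvOcc, dif_neg]
  intro hc
  rw [h] at hc
  exact absurd hc.1 (by norm_num)

lemma pvOcc_pos {a v t : List Char} {sn : Nat} (hg : pvGood a v)
    (h : PySem.Chars.find t a = (sn : Int)) :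
    pvOcc a t = pvOcc a (t.drop (sn + a.length)) + 1 := by
  rw [pvOcc, dif_pos (by rw [h]; exact ⟨Int.natCast_nonneg sn, hg.1, by simp [pvFind_bounds h]⟩)]
  simp only [h, Int.toNat_natCast]

lemma pvOcc_le_aux (a : List Char) : ∀ (n : Nat) (t : List Char), t.length ≤ n →
    pvOcc a t ≤ t.length := by
  intro n
  induction n with
  | zero =>
    intro t ht
    rw [pvOcc]
    split
    · rename_i hc
      omega
    · exact Nat.zero_le _
  | succ n ih =>
    intro t ht
    rw [pvOcc]
    split
    · rename_i hc
      have hrec := ih (t.drop ((PySem.Chars.find t a).toNat + a.length))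
        (by simp only [List.length_drop]; omega)
      simp only [List.length_drop] at hrec
      omega
    · exact Nat.zero_le _

lemma pvOcc_le (a t : List Char) : pvOcc a t ≤ t.length :=
  pvOcc_le_aux a t.length t le_rfl

lemma pvOcc_shift {a v P : List Char} (hg : pvGood a v) (hs : pvShield a v P) (S : List Char) :
    pvOcc a (P ++ S) = pvOcc a S := by
  have hFS := pvFS hg hs S
  by_cases hS : PySem.Chars.find S a = -1
  · rw [if_pos hS] at hFS
    rw [pvOcc_neg hFS, pvOcc_neg hS]
  · have hge : 0 ≤ PySem.Chars.find S a := by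
      have := PySem.Chars.neg_one_le_find S a
      omega
    have hSf : PySem.Chars.find S a = (((PySem.Chars.find S a).toNat : Nat) : Int) := by omega
    rw [if_neg hS, hSf] at hFS
    have hfPS : PySem.Chars.find (P ++ S) a =
        ((P.length + (PySem.Chars.find S a).toNat : Nat) : Int) := by
      rw [hFS]
      push_cast
      ring
    rw [pvOcc_pos hg hfPS, pvOcc_pos hg hSf,
      pvDrop_append_ge P S (P.length + (PySem.Chars.find S a).toNat + a.length) (by omega),
      show P.length + (PySem.Chars.find S a).toNat + a.length - P.length
        = (PySem.Chars.find S a).toNat + a.length by omega]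

lemma pvGetD_drop {α : Type} [Inhabited α] (l : List α) (i j : Nat) (d : α) :
    (l.drop i).getD j d = l.getD (i + j) d := by
  simp [List.getD_eq_getElem?_getD, List.getElem?_drop]

lemma pvGetD_append_right {α : Type} [Inhabited α] (l₁ l₂ : List α) (n : Nat) (d : α)
    (h : l₁.length ≤ n) : (l₁ ++ l₂).getD n d = l₂.getD (n - l₁.length) d := by
  simp [List.getD_eq_getElem?_getD, List.getElem?_append_right h]

lemma pvLOC {a v P S : List Char} {Pm Sm : List Int} (hg : pvGood a v)
    (hs : pvShield a v P) (hlen : Pm.length = P.length) :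
    pvProc a v (P ++ S) (Pm ++ Sm) =
      (P ++ (pvProc a v S Sm).1, Pm ++ (pvProc a v S Sm).2) := by
  have hFS := pvFS hg hs S
  by_cases hS : PySem.Chars.find S a = -1
  · rw [if_pos hS] at hFS
    rw [pvProc_neg hFS, pvProc_neg hS]
  · have hge : 0 ≤ PySem.Chars.find S a := by
      have := PySem.Chars.neg_one_le_find S a
      omega
    obtain ⟨s1, hSf⟩ : ∃ s1 : Nat, PySem.Chars.find S a = (s1 : Int) :=
      ⟨(PySem.Chars.find S a).toNat, by omega⟩
    have ha0 := hg.1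
    have hb := pvFind_bounds hSf
    rw [if_neg hS, hSf] at hFS
    have hfPS : PySem.Chars.find (P ++ S) a = ((P.length + s1 : Nat) : Int) := by
      rw [hFS]
      push_cast
      ring
    have e1 : (P ++ S).take (P.length + s1) = P ++ S.take s1 := by
      rw [List.take_append, List.take_of_length_le (by omega), Nat.add_sub_cancel_left]
    have e2 : (Pm ++ Sm).take (P.length + s1) = Pm ++ Sm.take s1 := by
      rw [List.take_append, List.take_of_length_le (by omega), hlen, Nat.add_sub_cancel_left]
    have e3 : (P ++ S).drop (P.length + s1 + a.length) = S.drop (s1 + a.length) := by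
      rw [pvDrop_append_ge P S (P.length + s1 + a.length) (by omega),
        show P.length + s1 + a.length - P.length = s1 + a.length by omega]
    have e4 : (Pm ++ Sm).drop (P.length + s1 + a.length) = Sm.drop (s1 + a.length) := by
      rw [pvDrop_append_ge Pm Sm (P.length + s1 + a.length) (by omega),
        show P.length + s1 + a.length - Pm.length = s1 + a.length by omega]
    have e5 : (Pm ++ Sm).getD (P.length + s1) 0 = Sm.getD s1 0 := by
      rw [pvGetD_append_right Pm Sm (P.length + s1) 0 (by omega),
        show P.length + s1 - Pm.length = s1 by omega]
    have e6 : (Pm ++ Sm).getD (P.length + s1 + a.length - 1) 0 =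
        Sm.getD (s1 + a.length - 1) 0 := by
      rw [pvGetD_append_right Pm Sm (P.length + s1 + a.length - 1) 0 (by omega),
        show P.length + s1 + a.length - 1 - Pm.length = s1 + a.length - 1 by omega]
    rw [pvProc_pos hg hfPS, pvProc_pos hg hSf, e1, e2, e3, e4, e5, e6]
    simp [List.append_assoc]

lemma pvProc_len_aux {a v : List Char} : ∀ (n : Nat) (t : List Char) (m : List Int),
    t.length ≤ n → t.length ≤ m.length →
    (pvProc a v t m).1.length ≤ (pvProc a v t m).2.length := by
  intro n
  induction n with
  | zero =>
    intro t m ht hm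
    rw [pvProc]
    split
    · rename_i hc
      exact absurd hc.2.2 (by omega)
    · simpa using hm
  | succ n ih =>
    intro t m ht hm
    rw [pvProc]
    split
    · rename_i hc
      have hrec := ih (t.drop ((PySem.Chars.find t a).toNat + a.length))
        (m.drop ((PySem.Chars.find t a).toNat + a.length))
        (by simp only [List.length_drop]; omega)
        (by simp only [List.length_drop]; omega)
      simp only [List.length_append, List.length_take, pvIns, List.length_map,
        PySem.List.length_pyRange_one]
      have hins : ((m.getD (PySem.Chars.find t a).toNat 0 + (v.length : Int)) -
          m.getD (PySem.Chars.find t a).toNat 0).toNat = v.length := by omega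
      rw [hins]
      simp only [List.length_drop] at hrec
      omega
    · simpa using hm

lemma pvProc_len {a v t m} (h : t.length ≤ m.length) :
    (pvProc a v t m).1.length ≤ (pvProc a v t m).2.length :=
  pvProc_len_aux t.length t m le_rfl h

lemma pvAugment_eval {a v t : List Char} {m : List Int} (sn : Nat) (ha0 : 0 < a.length) :
    pvAugmentA t m (sn : Int) ((sn : Int) + PySem.List.len a) v =
      (t.take sn ++ v ++ t.drop (sn + a.length),
       m.take sn ++ pvIns (m.getD sn 0) (m.getD (sn + a.length - 1) 0) v.length ++
         m.drop (sn + a.length)) := by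
  simp only [pvAugmentA, pvIns, PySem.List.len_eq]
  rw [show (sn : Int) + (a.length : Int) = ((sn + a.length : Nat) : Int) by push_cast; ring]
  rw [show ((sn + a.length : Nat) : Int) - 1 = ((sn + a.length - 1 : Nat) : Int) by omega]
  rw [PySem.List.foldl_append_singleton_eq_map,
    PySem.List.slice_to_natCast, PySem.List.slice_from_natCast,
    PySem.List.slice_to_natCast, PySem.List.slice_from_natCast,
    PySem.List.pyGetD_natCast, PySem.List.pyGetD_natCast]
  simp

lemma pvLA {a v : List Char} (hg : pvGood a v) :
    ∀ (fuel : Nat) (t : List Char) (m : List Int), pvOcc a t < fuel → t.length ≤ m.length →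
      pvLoopA a v fuel (t, m) = pvProc a v t m := by
  intro fuel
  induction fuel with
  | zero =>
    intro t m h _
    exact absurd h (Nat.not_lt_zero _)
  | succ fuel ih =>
    intro t m hocc hm
    by_cases hf : PySem.Chars.find t a = -1
    · simp only [pvLoopA]
      rw [if_pos hf, pvProc_neg hf]
    · obtain ⟨sn, hsn⟩ : ∃ sn : Nat, PySem.Chars.find t a = (sn : Int) := by
        have := PySem.Chars.neg_one_le_find t a
        exact ⟨(PySem.Chars.find t a).toNat, by omega⟩
      have hb := pvFind_bounds hsn
      have ha0 := hg.1
      have hshield := pvShield_of_find (v := v) hg hsn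
      simp only [pvLoopA]
      rw [if_neg hf, hsn, pvAugment_eval sn ha0]
      have htake : (t.take sn).length = sn := by simp; omega
      have hInsLen : (pvIns (m.getD sn 0) (m.getD (sn + a.length - 1) 0) v.length).length
          = v.length := by
        simp only [pvIns, List.length_map, PySem.List.length_pyRange_one]
        omega
      have hoccnew : pvOcc a (t.take sn ++ v ++ t.drop (sn + a.length)) < fuel := by
        rw [pvOcc_shift hg hshield]
        have := pvOcc_pos hg hsn
        omega
      have hlennew : (t.take sn ++ v ++ t.drop (sn + a.length)).length ≤
          (m.take sn ++ pvIns (m.getD sn 0) (m.getD (sn + a.length - 1) 0) v.length ++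
            m.drop (sn + a.length)).length := by
        simp only [List.length_append, List.length_take, List.length_drop, hInsLen]
        omega
      rw [ih _ _ hoccnew hlennew,
        pvLOC hg hshield (by
          simp only [List.length_append, List.length_take, hInsLen, htake]
          omega),
        pvProc_pos hg hsn]

lemma pvLB {a v : List Char} (hg : pvGood a v) (t : List Char) (m : List Int)
    (hm : t.length ≤ m.length) :
    ∀ (fuel : Nat) (posn : Nat) (accT : List Char) (accM : List Int),
      pvOcc a (t.drop posn) < fuel → posn ≤ t.length →
      pvScanB a v t m fuel (posn : Int) accT accM =
        (accT ++ (pvProc a v (t.drop posn) (m.drop posn)).1,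
         accM ++ (pvProc a v (t.drop posn) (m.drop posn)).2) := by
  intro fuel
  induction fuel with
  | zero =>
    intro posn accT accM h _
    exact absurd h (Nat.not_lt_zero _)
  | succ fuel ih =>
    intro posn accT accM hocc hpos
    simp only [pvScanB]
    rw [PySem.Chars.findFrom_natCast t a posn hpos]
    by_cases hf : PySem.Chars.find (t.drop posn) a = -1
    · rw [if_pos hf, if_pos rfl, pvProc_neg hf,
        PySem.List.slice_from_natCast, PySem.List.slice_from_natCast]
    · obtain ⟨s1, hs1⟩ : ∃ s1 : Nat, PySem.Chars.find (t.drop posn) a = (s1 : Int) := by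
        have := PySem.Chars.neg_one_le_find (t.drop posn) a
        exact ⟨(PySem.Chars.find (t.drop posn) a).toNat, by omega⟩
      have hb := pvFind_bounds hs1
      simp only [List.length_drop] at hb
      have ha0 := hg.1
      rw [if_neg hf, hs1,
        show (posn : Int) + (s1 : Int) = ((posn + s1 : Nat) : Int) by push_cast; ring,
        if_neg (by omega : ¬((posn + s1 : Nat) : Int) = -1)]
      simp only [PySem.List.len_eq]
      rw [show ((posn + s1 : Nat) : Int) + (a.length : Int) =
            ((posn + s1 + a.length : Nat) : Int) by push_cast; ring,
        show ((posn + s1 + a.length : Nat) : Int) - 1 =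
            ((posn + s1 + a.length - 1 : Nat) : Int) by omega,
        PySem.List.pyGetD_natCast, PySem.List.pyGetD_natCast,
        PySem.List.slice_natCast, PySem.List.slice_natCast,
        show posn + s1 - posn = s1 by omega]
      have hstep := pvOcc_pos hg hs1
      rw [List.drop_drop, ← Nat.add_assoc] at hstep
      rw [ih (posn + s1 + a.length) _ _ (by omega) (by omega),
        pvProc_pos hg hs1, List.drop_drop, List.drop_drop,
        show posn + (s1 + a.length) = posn + s1 + a.length by omega,
        pvGetD_drop, pvGetD_drop,
        show posn + (s1 + a.length - 1) = posn + s1 + a.length - 1 by omega]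
      simp [pvIns, List.append_assoc]

lemma pvItem {a v : List Char} (hg : pvGood a v) (t : List Char) (m : List Int)
    (hm : t.length ≤ m.length) :
    pvLoopA a v (t.length + 1) (t, m) = pvScanB a v t m (t.length + 1) 0 [] [] ∧
    pvLoopA a v (t.length + 1) (t, m) = pvProc a v t m := by
  have hoc : pvOcc a t < t.length + 1 := by
    have := pvOcc_le a t
    omega
  have h2 : pvLoopA a v (t.length + 1) (t, m) = pvProc a v t m :=
    pvLA hg (t.length + 1) t m hoc hm
  have h1 : pvScanB a v t m (t.length + 1) 0 [] [] = pvProc a v t m := by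
    have := pvLB hg t m hm (t.length + 1) 0 [] [] (by simpa using hoc) (Nat.zero_le _)
    simpa using this
  exact ⟨h2.trans h1.symm, h2⟩

lemma pvChain (items : List (String × String)) :
    (∀ p ∈ items, pvGood p.1.toList p.2.toList) →
    ∀ (t : List Char) (m : List Int), t.length ≤ m.length →
      items.foldl (fun (st : List Char × List Int) (p : String × String) =>
          pvLoopA p.1.toList p.2.toList (st.1.length + 1) st) (t, m) =
      items.foldl (fun (st : List Char × List Int) (p : String × String) =>
          pvScanB p.1.toList p.2.toList st.1 st.2 (st.1.length + 1) 0 [] []) (t, m) := by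
  induction items with
  | nil =>
    intro _ t m _
    rfl
  | cons p rest ih =>
    intro hall t m hm
    have hp := pvItem (hall p (List.mem_cons_self)) t m hm
    have hrest : ∀ q ∈ rest, pvGood q.1.toList q.2.toList :=
      fun q hq => hall q (List.mem_cons_of_mem _ hq)
    simp only [List.foldl_cons]
    show List.foldl _ (pvLoopA p.1.toList p.2.toList (t.length + 1) (t, m)) rest =
      List.foldl _ (pvScanB p.1.toList p.2.toList t m (t.length + 1) 0 [] []) rest
    rw [hp.2, hp.1.symm.trans hp.2]
    have hq := ih hrest (pvProc p.1.toList p.2.toList t m).1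
      (pvProc p.1.toList p.2.toList t m).2 (pvProc_len hm)
    simpa using hq

lemma pvChain2 (items : List (String × String)) (t : List Char) (m : List Int) :
    (∀ p ∈ items, PySem.Chars.find t p.1.toList = -1) →
    items.foldl (fun (st : List Char × List Int) (p : String × String) =>
        pvLoopA p.1.toList p.2.toList (st.1.length + 1) st) (t, m) = (t, m) ∧
    items.foldl (fun (st : List Char × List Int) (p : String × String) =>
        pvScanB p.1.toList p.2.toList st.1 st.2 (st.1.length + 1) 0 [] []) (t, m) = (t, m) := by
  induction items with
  | nil =>
    exact fun _ => ⟨rfl, rfl⟩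
  | cons p rest ih =>
    intro hall
    have hfa : PySem.Chars.find t p.1.toList = -1 := hall p (List.mem_cons_self)
    have hA : pvLoopA p.1.toList p.2.toList (t.length + 1) (t, m) = (t, m) := by
      simp only [pvLoopA]
      rw [if_pos hfa]
    have hB : pvScanB p.1.toList p.2.toList t m (t.length + 1) 0 [] [] = (t, m) := by
      simp only [pvScanB, PySem.Chars.findFrom_zero]
      rw [if_pos hfa]
      simp [PySem.List.slice_zero_start, PySem.List.slice_none_none]
    have ihr := ih (fun q hq => hall q (List.mem_cons_of_mem _ hq))
    constructor
    · simp only [List.foldl_cons]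
      show List.foldl _ (pvLoopA p.1.toList p.2.toList (t.length + 1) (t, m)) rest = (t, m)
      rw [hA]
      exact ihr.1
    · simp only [List.foldl_cons]
      show List.foldl _ (pvScanB p.1.toList p.2.toList t m (t.length + 1) 0 [] []) rest = (t, m)
      rw [hB]
      exact ihr.2

lemma pvMain (text : String) (mappings : List Int) (items : List (String × String))
    (abbrs : List String)
    (hall : ∀ p ∈ items, pvGood p.1.toList p.2.toList)
    (hmap : items.map Prod.fst = abbrs)
    (hpre : text.toList.length ≤ mappings.length ∨
      ∀ ab ∈ abbrs, PySem.Str.isIn ab text = false) :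
    items.foldl (fun (st : List Char × List Int) (p : String × String) =>
        pvLoopA p.1.toList p.2.toList (st.1.length + 1) st) (text.toList, mappings) =
    items.foldl (fun (st : List Char × List Int) (p : String × String) =>
        pvScanB p.1.toList p.2.toList st.1 st.2 (st.1.length + 1) 0 [] []) (text.toList, mappings) := by
  rcases hpre with hlen | hno
  · exact pvChain items hall text.toList mappings hlen
  · have hfind : ∀ p ∈ items, PySem.Chars.find text.toList p.1.toList = -1 := by
      intro p hp
      have hfalse : PySem.Str.isIn p.1 text = false := by
        apply hno
        rw [← hmap]
        exact List.mem_map_of_mem hp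
      rw [PySem.Chars.find_eq_neg_one_iff]
      intro hinf
      have htrue := (PySem.Str.isIn_iff_infix p.1 text).2 hinf
      rw [hfalse] at htrue
      cases htrue
    obtain ⟨hA, hB⟩ := pvChain2 items text.toList mappings hfind
    rw [hA, hB]

-- ===== VERDICT (by name: the statement is the Claim_ definition above) =====
theorem normalize_abbr_spec : Claim_equal_normalize_abbr := by
  intro text mappings lang _hdom hpre
  unfold Spec_normalize_abbr normalize_abbr normalize_abbr_alt
  rcases hl : pvABBR.lookup lang with _ | items
  · rfl
  · have hmm : lang = "en" ∨ lang = "es" ∨ lang = "fr" ∨ lang = "de" ∨ lang = "it" ∨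
        lang = "pt" := by
      by_contra hc
      push_neg at hc
      obtain ⟨h1, h2, h3, h4, h5, h6⟩ := hc
      have hnone : pvABBR.lookup lang = none := by
        simp [pvABBR, List.lookup, beq_eq_false_iff_ne.2 h1, beq_eq_false_iff_ne.2 h2,
          beq_eq_false_iff_ne.2 h3, beq_eq_false_iff_ne.2 h4, beq_eq_false_iff_ne.2 h5,
          beq_eq_false_iff_ne.2 h6]
      rw [hnone] at hl
      cases hl
    have hkey : ∀ (L : List (String × String)) (abbrs : List String),
        pvABBR.lookup lang = some L →
        (∀ p ∈ L, pvGood p.1.toList p.2.toList) →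
        L.map Prod.fst = abbrs →
        ((lang, abbrs) ∈ pvPreTable) →
        ((fun (st : List Char × List Int) => (String.ofList st.1, st.2))
          (items.foldl (fun (st : List Char × List Int) (p : String × String) =>
            pvLoopA p.1.toList p.2.toList (st.1.length + 1) st) (text.toList, mappings)) =
         (fun (st : List Char × List Int) => (String.ofList st.1, st.2))
          (items.foldl (fun (st : List Char × List Int) (p : String × String) =>
            pvScanB p.1.toList p.2.toList st.1 st.2 (st.1.length + 1) 0 [] []) (text.toList, mappings))) := by
      intro L abbrs hL hall hmap hmem
      have hiL : items = L := by
        rw [hL] at hl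
        exact (Option.some.inj hl).symm
      subst hiL
      have hpre' : text.toList.length ≤ mappings.length ∨
          ∀ ab ∈ abbrs, PySem.Str.isIn ab text = false := by
        rcases hpre with h | h
        · exact Or.inl h
        · exact Or.inr (fun ab hab => h (lang, abbrs) hmem rfl ab hab)
      have := pvMain text mappings items abbrs hall hmap hpre'
      rw [this]
    rcases hmm with h | h | h | h | h | h <;> subst h
    · exact hkey [("dr.", "doctor"), ("mr.", "mister"), ("mrs.", "missus"),
        ("prof.", "professor")] ["dr.", "mr.", "mrs.", "prof."]
        (by decide) (by decide) rfl (by decide)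
    · exact hkey [("dr.", "doctor"), ("sr.", "señor"), ("sra.", "señora"),
        ("prof.", "profesor")] ["dr.", "sr.", "sra.", "prof."]
        (by decide) (by decide) rfl (by decide)
    · exact hkey [("dr.", "docteur"), ("m.", "monsieur"), ("mme.", "madame"),
        ("prof.", "professeur")] ["dr.", "m.", "mme.", "prof."]
        (by decide) (by decide) rfl (by decide)
    · exact hkey [("dr.", "doktor"), ("prof.", "professor")] ["dr.", "prof."]
        (by decide) (by decide) rfl (by decide)
    · exact hkey [("dr.", "dottore"), ("prof.", "professore")] ["dr.", "prof."]
        (by decide) (by decide) rfl (by decide)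
    · exact hkey [("dr.", "doutor"), ("prof.", "professor")] ["dr.", "prof."]
        (by decide) (by decide) rfl (by decide)
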